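-- pv_equiv track=rewrite | github.com/htang7415/Max-Handbook | modules/databases/caching/cache-admission-policies/python/cache_admission_policies.py | admitted_keys
-- ===== SOURCE A (Python) =====
-- def validate_min_hits(min_hits: int) -> None:
--     if min_hits <= 0:
--         raise ValueError("min_hits must be positive")
--
-- def request_counts(stream: list[str]) -> dict[str, int]:
--     counts: dict[str, int] = {}
--     for key in stream:
--         counts[key] = counts.get(key, 0) + 1
--     return counts
--
-- def admit_always(key: str) -> bool:
--     del key
--     return True
--
-- def admit_on_frequency(key: str, counts: dict[str, int], min_hits: int) -> bool:
--     validate_min_hits(min_hits)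
--     return counts.get(key, 0) >= min_hits
--
-- def admitted_keys(stream: list[str], min_hits: int) -> dict[str, list[str]]:
--     validate_min_hits(min_hits)
--     counts = request_counts(stream)
--     ordered_unique: list[str] = []
--     seen: set[str] = set()
--     for key in stream:
--         if key not in seen:
--             ordered_unique.append(key)
--             seen.add(key)
--
--     frequency_admitted = [
--         key
--         for key in ordered_unique
--         if admit_on_frequency(key, counts, min_hits)
--     ]
--     rejected = [
--         key
--         for key in ordered_unique
--         if not admit_on_frequency(key, counts, min_hits)
--     ]
--     return {
--         "always": [key for key in ordered_unique if admit_always(key)],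
--         "frequency_threshold": frequency_admitted,
--         "rejected_by_frequency": rejected,
--     }
-- ===== SOURCE B (Python) =====
-- def admitted_keys(stream: list[str], min_hits: int) -> dict[str, list[str]]:
--     if min_hits <= 0:
--         raise ValueError("min_hits must be positive")
--     counts: dict[str, int] = {}
--     for key in stream:
--         counts[key] = counts.get(key, 0) + 1
--     # Reverse scan with a countdown copy of the counts: an occurrence is the
--     # FIRST (forward) occurrence of its key exactly when its remaining count
--     # reaches 0.  The three lists are built back-to-front and reversed once.
--     remaining = dict(counts)
--     always_r: list[str] = []
--     admitted_r: list[str] = []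
--     rejected_r: list[str] = []
--     for key in reversed(stream):
--         c = remaining[key] - 1
--         remaining[key] = c
--         if c == 0:
--             always_r.append(key)
--             if counts[key] >= min_hits:
--                 admitted_r.append(key)
--             else:
--                 rejected_r.append(key)
--     return {
--         "always": always_r[::-1],
--         "frequency_threshold": admitted_r[::-1],
--         "rejected_by_frequency": rejected_r[::-1],
--     }
-- ===== Notes on version B (the rewrite author's own statement) =====
-- stated objective: alternative
-- what changed: B drops A's seen-set dedup list and the three comprehensions over it: it scans the stream BACKWARDS decrementing a countdown copy of the counts, recognises a forward-first occurrence exactly when its remaining count hits 0, builds the three lists back-to-front in that single reverse pass and reverses them once at the end.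
import Mathlib
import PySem

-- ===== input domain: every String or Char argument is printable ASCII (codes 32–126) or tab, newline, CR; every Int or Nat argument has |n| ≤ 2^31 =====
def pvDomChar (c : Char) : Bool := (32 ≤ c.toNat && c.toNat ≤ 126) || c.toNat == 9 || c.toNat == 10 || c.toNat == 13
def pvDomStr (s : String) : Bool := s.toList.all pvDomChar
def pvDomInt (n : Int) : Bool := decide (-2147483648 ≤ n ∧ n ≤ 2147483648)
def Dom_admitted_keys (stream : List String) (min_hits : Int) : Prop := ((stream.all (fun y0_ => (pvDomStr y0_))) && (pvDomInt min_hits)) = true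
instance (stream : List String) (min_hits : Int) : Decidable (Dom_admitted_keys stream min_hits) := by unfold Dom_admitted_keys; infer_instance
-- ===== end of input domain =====

-- B replaces A's seen-set dedup and the three comprehensions by a single reverse scan that
-- detects forward-first occurrences by counting remaining occurrences down to 0; alternative
-- algorithm, same return value.

-- ===== PORT A =====
-- helper request_counts: counts[key] = counts.get(key, 0) + 1
def pvRequestCounts (stream : List String) : PySem.Dict String Int :=
  stream.foldl (fun d k => d.insert k (d.getD k 0 + 1)) PySem.Dict.empty

-- helper admit_always
def pvAdmitAlways (_key : String) : Bool := true

-- helper admit_on_frequency (validate_min_hits raises for min_hits ≤ 0; excluded by Pre_)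
def pvAdmitOnFrequency (key : String) (counts : PySem.Dict String Int) (min_hits : Int) : Bool :=
  decide (min_hits ≤ counts.getD key 0)

def admitted_keys (stream : List String) (min_hits : Int) : List (String × List String) :=
  let counts := pvRequestCounts stream
  -- ordered_unique / seen loop
  let p := stream.foldl
    (fun (st : List String × PySem.Set String) k =>
      if st.2.contains k then st else (st.1 ++ [k], PySem.Set.add st.2 k))
    ([], PySem.Set.empty)
  let ordered_unique := p.1
  let frequency_admitted := ordered_unique.filter (fun k => pvAdmitOnFrequency k counts min_hits)
  let rejected := ordered_unique.filter (fun k => !pvAdmitOnFrequency k counts min_hits)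
  [("always", ordered_unique.filter (fun k => pvAdmitAlways k)),
   ("frequency_threshold", frequency_admitted),
   ("rejected_by_frequency", rejected)]

-- ===== PORT B =====
-- reverse scan of Source B: `for key in reversed(stream)` is a foldl over stream.reverse;
-- `remaining[key] - 1` is exact as getD _ 0 - 1 because every key of the stream is in
-- `remaining` (= counts); `xs[::-1]` is List.reverse.
-- one iteration of Source B's reverse loop (remaining-dict countdown, classify on hit-0)
def pvStep (min_hits : Int) (counts : PySem.Dict String Int)
    (st : PySem.Dict String Int × List String × List String × List String) (k : String) :
    PySem.Dict String Int × List String × List String × List String :=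
  let c := st.1.getD k 0 - 1
  let d := st.1.insert k c
  if c = 0 then
    (d, st.2.1 ++ [k],
     if min_hits ≤ counts.getD k 0 then st.2.2.1 ++ [k] else st.2.2.1,
     if min_hits ≤ counts.getD k 0 then st.2.2.2 else st.2.2.2 ++ [k])
  else (d, st.2.1, st.2.2.1, st.2.2.2)

def admitted_keys_alt (stream : List String) (min_hits : Int) : List (String × List String) :=
  let counts := stream.foldl (fun d k => d.insert k (d.getD k 0 + 1))
    (PySem.Dict.empty : PySem.Dict String Int)
  let st := stream.reverse.foldl (pvStep min_hits counts) (counts, [], [], [])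
  [("always", st.2.1.reverse),
   ("frequency_threshold", st.2.2.1.reverse),
   ("rejected_by_frequency", st.2.2.2.reverse)]

-- ===== PRECONDITION & SPEC =====
-- A raises ValueError when min_hits ≤ 0; Pre_ excludes exactly those inputs.
def Pre_admitted_keys (stream : List String) (min_hits : Int) : Prop := 0 < min_hits
instance (stream : List String) (min_hits : Int) : Decidable (Pre_admitted_keys stream min_hits) := by unfold Pre_admitted_keys; infer_instance
def pvWitness_admitted_keys : List String × Int := (["a", "b", "a"], 2)

def Spec_admitted_keys (stream : List String) (min_hits : Int) (out : List (String × List String)) : Prop := out = admitted_keys_alt stream min_hits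
instance (stream : List String) (min_hits : Int) (out : List (String × List String)) : Decidable (Spec_admitted_keys stream min_hits out) := by unfold Spec_admitted_keys; infer_instance

-- ===== CLAIM (what is proved, stated in full; the proofs are below) =====
def Claim_equal_admitted_keys : Prop := ∀ (stream : List String) (min_hits : Int), Dom_admitted_keys stream min_hits → Pre_admitted_keys stream min_hits → Spec_admitted_keys stream min_hits (admitted_keys stream min_hits)

-- ===== LEMMAS AND PROOFS =====

-- A's dedup loop keeps its two accumulators equal (ordered_unique = seen as lists).
theorem pvDedupLoop (stream : List String) (s : PySem.Set String) :
    stream.foldl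
      (fun (st : List String × PySem.Set String) k =>
        if st.2.contains k then st else (st.1 ++ [k], PySem.Set.add st.2 k))
      (s, s) = (PySem.Set.update s stream, PySem.Set.update s stream) := by
  induction stream generalizing s with
  | nil => rw [List.foldl_nil, PySem.Set.update_nil]
  | cons x xs ih =>
    by_cases h : x ∈ s
    · have hc : s.contains x = true := by simp [h]
      simp only [List.foldl_cons, hc, if_true]
      rw [ih, PySem.Set.update_cons, PySem.Set.add_of_mem h]
    · have hc : s.contains x = false := by simp [h]
      simp only [List.foldl_cons, hc, Bool.false_eq_true, if_false]
      rw [PySem.Set.update_cons, ← PySem.Set.add_of_not_mem h, ih]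

-- the keys of `rest` whose first occurrence lies in `rest` (none in `pre`), in forward order
def pvNewKeys : List String → List String → List String
  | _, [] => []
  | pre, x :: r => (if x ∈ pre then [] else [x]) ++ pvNewKeys (pre ++ [x]) r

-- pvNewKeys extends the deduped prefix to the deduped whole
theorem pvNewKeys_update (rest pre : List String) :
    PySem.Set.ofList pre ++ pvNewKeys pre rest = PySem.Set.update (PySem.Set.ofList pre) rest := by
  induction rest generalizing pre with
  | nil => simp [pvNewKeys, PySem.Set.update_nil]
  | cons x r ih =>
    rw [PySem.Set.update_cons]
    have hof : PySem.Set.ofList (pre ++ [x]) = PySem.Set.add (PySem.Set.ofList pre) x := by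
      rw [PySem.Set.ofList_eq_foldl, PySem.Set.ofList_eq_foldl, List.foldl_append]
      rfl
    have h2 := ih (pre ++ [x])
    rw [hof] at h2
    by_cases h : x ∈ pre
    · have hadd : PySem.Set.add (PySem.Set.ofList pre) x = PySem.Set.ofList pre :=
        PySem.Set.add_of_mem (by simpa [PySem.Set.mem_ofList] using h)
      rw [hadd] at h2
      rw [pvNewKeys, if_pos h, List.nil_append, h2, hadd]
    · have hns : x ∉ PySem.Set.ofList pre := by simpa [PySem.Set.mem_ofList] using h
      rw [PySem.Set.add_of_not_mem hns] at h2 ⊢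
      rw [pvNewKeys, if_neg h, ← List.append_assoc]
      exact h2

-- the reverse countdown loop of B, characterised: starting from a dict holding
-- pre.count + xs.count for every key, it appends (reversed) the forward-first
-- occurrences of xs that are new w.r.t. pre, classified by the captured counts.
theorem pvRevLoop (min_hits : Int) (counts : PySem.Dict String Int)
    (xs pre : List String) (d : PySem.Dict String Int)
    (hd : ∀ k, d.getD k 0 = ((pre.count k + xs.count k : Nat) : Int))
    (a f r : List String) :
    ∃ d', xs.foldr (fun k st => pvStep min_hits counts st k) (d, a, f, r)
      = (d',
         a ++ (pvNewKeys pre xs).reverse,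
         f ++ ((pvNewKeys pre xs).reverse.filter (fun k => decide (min_hits ≤ counts.getD k 0))),
         r ++ ((pvNewKeys pre xs).reverse.filter (fun k => !decide (min_hits ≤ counts.getD k 0))))
      ∧ ∀ k, d'.getD k 0 = ((pre.count k : Nat) : Int) := by
  induction xs generalizing pre d a f r with
  | nil =>
    refine ⟨d, by simp [pvNewKeys], fun k => by simpa using hd k⟩
  | cons x r' ih =>
    have hd' : ∀ k, d.getD k 0 = (((pre ++ [x]).count k + r'.count k : Nat) : Int) := by
      intro k
      rw [hd k]
      congr 1
      simp [List.count_cons, List.count_append]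
      omega
    obtain ⟨d', hfold, hgd⟩ := ih (pre ++ [x]) d hd' a f r
    rw [List.foldr_cons, hfold]
    simp only [pvStep]
    have hx : d'.getD x 0 = ((pre.count x : Nat) : Int) + 1 := by
      rw [hgd x]; simp [List.count_append]
    by_cases hmem : x ∈ pre
    · -- not a first occurrence: count stays positive, nothing appended
      have hc : d'.getD x 0 - 1 ≠ 0 := by
        rw [hx]
        have : 0 < pre.count x := List.count_pos_iff.mpr hmem
        omega
      refine ⟨d'.insert x (d'.getD x 0 - 1), ?_, ?_⟩
      · simp only [hc, if_false]
        rw [pvNewKeys, if_pos hmem, List.nil_append]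
      · intro k
        rw [PySem.Dict.getD_insert]
        by_cases hk : k = x
        · subst hk; rw [if_pos rfl, hx]; omega
        · have hsing : ([x] : List String).count k = 0 :=
            List.count_eq_zero.mpr (by simp [hk])
          rw [if_neg hk, hgd k]
          congr 1
          rw [List.count_append, hsing]
          omega
    · -- first occurrence of x: remaining hits 0, x appended
      have hc0 : pre.count x = 0 := List.count_eq_zero.mpr hmem
      have hc : d'.getD x 0 - 1 = 0 := by rw [hx, hc0]; simp
      refine ⟨d'.insert x (d'.getD x 0 - 1), ?_, ?_⟩
      · simp only [hc, if_pos]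
        rw [pvNewKeys, if_neg hmem]
        simp only [List.reverse_append, List.reverse_cons, List.reverse_nil,
          List.nil_append, List.filter_append, List.append_assoc]
        by_cases hp : min_hits ≤ counts.getD x 0 <;>
          simp [hp]
      · intro k
        rw [PySem.Dict.getD_insert]
        by_cases hk : k = x
        · subst hk; rw [if_pos rfl, hc, hc0]; simp
        · have hsing : ([x] : List String).count k = 0 :=
            List.count_eq_zero.mpr (by simp [hk])
          rw [if_neg hk, hgd k]
          congr 1
          rw [List.count_append, hsing]
          omega

-- ===== VERDICT (by name: the statement is the Claim_ definition above) =====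
theorem admitted_keys_spec : Claim_equal_admitted_keys := by
  intro stream min_hits _ _
  unfold Spec_admitted_keys admitted_keys admitted_keys_alt
  have hc : pvRequestCounts stream = PySem.Dict.counter stream :=
    PySem.Dict.foldl_insert_getD_add_one_eq_counter stream
  have hc' : stream.foldl (fun d k => d.insert k (d.getD k 0 + 1))
      (PySem.Dict.empty : PySem.Dict String Int) = PySem.Dict.counter stream :=
    PySem.Dict.foldl_insert_getD_add_one_eq_counter stream
  rw [hc, hc']
  -- A's dedup loop
  rw [show (([], PySem.Set.empty) : List String × PySem.Set String)
        = (([] : PySem.Set String), ([] : PySem.Set String)) from rfl]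
  rw [pvDedupLoop stream ([] : PySem.Set String)]
  -- B's reverse loop
  dsimp only
  rw [List.foldl_reverse]
  obtain ⟨d', hfold, -⟩ := pvRevLoop min_hits (PySem.Dict.counter stream) stream []
    (PySem.Dict.counter stream)
    (fun k => by simp [PySem.Dict.getD_counter]) [] [] []
  rw [hfold]
  have hnk : pvNewKeys [] stream = PySem.Set.ofList stream := by
    have h := pvNewKeys_update stream []
    rw [show PySem.Set.ofList ([] : List String) = ([] : PySem.Set String) from rfl] at h
    rw [PySem.Set.update_nil_left] at h
    simpa using h
  rw [show PySem.Set.update ([] : PySem.Set String) stream = PySem.Set.ofList stream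
        from PySem.Set.update_nil_left stream]
  simp [pvAdmitAlways, pvAdmitOnFrequency, hnk, List.filter_reverse]
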